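-- pv_equiv track=rewrite | github.com/Sesuu2003/Lenguaje-Matescript | AnalizadorLexico.py | esString
-- ===== SOURCE A (Python) =====
-- from enum import Enum  # TAS Panda
--
-- class Sigma(Enum):
--     LETRA = "Letra"
--     DIGITO = "Digito"
--     CESPECIAL = "Caracter especial"
--     OPREL = "OpRel"
--     OPARITMETICO = "OpAritmetico"
--     COMILLAS = "Comillas"
--     PUNTO = "Punto"
--     OTRO = "Otro"
--
-- CARACTERES_ESPECIALES = {'_','@','#', '$', '%', '&','¿','?','¡', '!','|','°',' '}
--
-- OPERADORES_RELACIONALES = {'>','<','='}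
--
-- OPERADORES_ARITMETICOS = {'-','+','*','/','^'}
--
-- def car_a_simb(car):
--     if car == '"':
--         return Sigma.COMILLAS.value
--     elif car.isalpha():
--         return Sigma.LETRA.value
--     elif car.isdigit():
--         return Sigma.DIGITO.value
--     elif car in CARACTERES_ESPECIALES:
--         return Sigma.CESPECIAL.value
--     elif car in OPERADORES_RELACIONALES:
--         return Sigma.OPREL.value
--     elif car in OPERADORES_ARITMETICOS:
--         return Sigma.OPARITMETICO.value
--     elif car == '.':
--         return Sigma.PUNTO.value
--     else:
--         return Sigma.OTRO.value
--
-- class SigmaString(Enum):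
--     OTRO = "Otro"
--     COMILLAS = 'Comillas'
--
-- def esString(cadena:str) -> bool:
--     q0 = 0
--     F = {4}
--
--     # Q = {0,1,2,3,4}
--     Delta = {
--         (0, SigmaString.COMILLAS.value):1,
--         (0, SigmaString.OTRO.value): 2,
--
--         (1, Sigma.COMILLAS.value):4,
--         (1, Sigma.OTRO.value): 3,
--
--         (3, SigmaString.OTRO.value):3,
--         (3, Sigma.COMILLAS.value):4,
--
--         (4, Sigma.COMILLAS.value):2,
--         (4, Sigma.OTRO.value):2,
--
--     }
--
--     estado_actual = q0
--     i=0
--     while estado_actual !=2 and not(i> len(cadena) -1):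
--         simbolo = car_a_simb(cadena[i])
--         if simbolo != SigmaString.COMILLAS.value:
--             simbolo = SigmaString.OTRO.value
--         estado_actual = Delta.get((estado_actual,simbolo),estado_actual)
--         i +=1
--     return estado_actual in F
-- ===== SOURCE B (Python) =====
-- def esString(cadena: str) -> bool:
--     return (len(cadena) >= 2 and cadena[0] == '"'
--             and cadena[-1] == '"' and '"' not in cadena[1:-1])
-- ===== Notes on version B (the rewrite author's own statement) =====
-- stated objective: simpler
-- what changed: Replaced the 5-state DFA table with an explicit while loop by a single boolean expression: length >= 2, first and last characters are '"', and no '"' strictly inside.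
import Mathlib
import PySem

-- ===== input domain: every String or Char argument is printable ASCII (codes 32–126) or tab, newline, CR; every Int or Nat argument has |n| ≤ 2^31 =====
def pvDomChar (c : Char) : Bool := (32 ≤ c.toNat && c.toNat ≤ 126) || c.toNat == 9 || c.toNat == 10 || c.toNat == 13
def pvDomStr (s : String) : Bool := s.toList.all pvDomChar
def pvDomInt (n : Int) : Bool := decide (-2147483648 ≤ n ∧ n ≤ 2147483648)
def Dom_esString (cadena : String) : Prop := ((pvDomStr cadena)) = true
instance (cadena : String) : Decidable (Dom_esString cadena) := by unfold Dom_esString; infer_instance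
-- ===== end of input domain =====

-- B replaces A's 5-state DFA table and while loop by one boolean expression; objective: simpler.

-- ===== PORT A =====
-- car_a_simb, transliterated branch by branch
def carASimb (c : Char) : String :=
  if c = '"' then "Comillas"
  else if PySem.Chars.isalpha c then "Letra"
  else if PySem.Chars.isdigit c then "Digito"
  else if c ∈ ['_','@','#','$','%','&','¿','?','¡','!','|','°',' '] then "Caracter especial"
  else if c ∈ ['>','<','='] then "OpRel"
  else if c ∈ ['-','+','*','/','^'] then "OpAritmetico"
  else if c = '.' then "Punto"
  else "Otro"

-- the Delta dict of A
def esDelta : PySem.Dict (Int × String) Int :=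
  ((((((((PySem.Dict.empty.insert (0, "Comillas") 1).insert (0, "Otro") 2).insert
      (1, "Comillas") 4).insert (1, "Otro") 3).insert
      (3, "Otro") 3).insert (3, "Comillas") 4).insert
      (4, "Comillas") 2).insert (4, "Otro") 2)

-- the while loop: runs while estado ≠ 2 and chars remain, consuming cadena[i]
def esLoop (estado : Int) (cs : List Char) : Int :=
  if estado = 2 then estado
  else match cs with
    | [] => estado
    | c :: rest =>
      let simbolo := carASimb c
      let simbolo := if simbolo ≠ "Comillas" then "Otro" else simbolo
      esLoop (esDelta.getD (estado, simbolo) estado) rest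

def esString (cadena : String) : Bool :=
  decide (esLoop 0 cadena.toList = 4)

-- ===== PORT B =====
def esString_alt (cadena : String) : Bool :=
  let cs := cadena.toList
  decide (cs.length ≥ 2) && (PySem.List.pyGet? cs 0 == some '"')
    && (PySem.List.pyGet? cs (-1) == some '"')
    && !(PySem.Chars.isIn ['"'] (PySem.List.slice cs (some 1) (some (-1))))

-- ===== PRECONDITION & SPEC =====
def Spec_esString (cadena : String) (out : Bool) : Prop := out = esString_alt cadena
instance (cadena : String) (out : Bool) : Decidable (Spec_esString cadena out) := by unfold Spec_esString; infer_instance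

-- ===== CLAIM (what is proved, stated in full; the proofs are below) =====
def Claim_equal_esString : Prop := ∀ (cadena : String), Dom_esString cadena → Spec_esString cadena (esString cadena)

-- ===== LEMMAS AND PROOFS =====

-- the normalized symbol only distinguishes '"' from everything else
theorem simb_norm (c : Char) :
    (if carASimb c ≠ "Comillas" then "Otro" else carASimb c)
      = (if c = '"' then "Comillas" else "Otro") := by
  unfold carASimb
  split_ifs <;> simp_all

theorem esLoop_two (cs : List Char) : esLoop 2 cs = 2 := by
  unfold esLoop; simp

theorem esLoop_four (cs : List Char) : esLoop 4 cs = if cs = [] then 4 else 2 := by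
  cases cs with
  | nil => rfl
  | cons c rest =>
    rw [show esLoop 4 (c :: rest)
        = esLoop (esDelta.getD (4, if carASimb c ≠ "Comillas" then "Otro" else carASimb c) 4) rest
      from rfl, simb_norm]
    by_cases hc : c = '"'
    · rw [if_pos hc, show esDelta.getD ((4 : Int), "Comillas") 4 = 2 from rfl, esLoop_two]; simp
    · rw [if_neg hc, show esDelta.getD ((4 : Int), "Otro") 4 = 2 from rfl, esLoop_two]; simp

-- from an "open string" state (1 or 3) the loop accepts exactly
-- a nonempty remainder whose last char is '"' with no '"' before it
theorem esLoop_open (cs : List Char) (st : Int) (hst : st = 1 ∨ st = 3) :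
    (esLoop st cs = 4) ↔
      (cs ≠ [] ∧ cs.getLast? = some '"' ∧ '"' ∉ cs.dropLast) := by
  induction cs generalizing st with
  | nil => rcases hst with h | h <;> subst h <;> simp [esLoop]
  | cons c rest ih =>
    have hne2 : st ≠ 2 := by rcases hst with h | h <;> omega
    rw [show esLoop st (c :: rest)
        = (if st = 2 then st else
            esLoop (esDelta.getD (st, if carASimb c ≠ "Comillas" then "Otro" else carASimb c) st) rest)
      from rfl]
    rw [if_neg hne2, simb_norm]
    by_cases hc : c = '"'
    · subst hc
      have hd : esDelta.getD (st, "Comillas") st = 4 := by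
        rcases hst with h | h <;> subst h <;> rfl
      rw [if_pos rfl, hd, esLoop_four]
      cases rest with
      | nil => simp
      | cons d r => simp [List.getLast?_cons_cons]
    · have hd : esDelta.getD (st, "Otro") st = 3 := by
        rcases hst with h | h <;> subst h <;> rfl
      rw [if_neg hc, hd, ih 3 (Or.inr rfl)]
      cases rest with
      | nil => simp [hc, eq_comm]
      | cons d r =>
        have hc' : ¬ ('"' = c) := fun h => hc h.symm
        simp [List.getLast?_cons_cons, hc']

theorem isIn_singleton (c : Char) (l : List Char) :
    PySem.Chars.isIn [c] l = l.contains c := by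
  rw [Bool.eq_iff_iff, PySem.Chars.isIn_iff_infix]
  simp [List.singleton_infix_iff]

theorem slice_one_negone (c : Char) (rest : List Char) :
    PySem.List.slice (c :: rest) (some 1) (some (-1)) = rest.dropLast := by
  simp [PySem.List.slice, PySem.List.clampIdx]
  rw [if_neg (by omega)]
  simp [List.dropLast_eq_take]

-- ===== VERDICT (by name: the statement is the Claim_ definition above) =====
theorem esString_spec : Claim_equal_esString := by
  intro cadena _
  unfold Spec_esString esString esString_alt
  rcases h : cadena.toList with _ | ⟨c, rest⟩
  · rfl
  · simp only []
    rw [show esLoop 0 (c :: rest)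
        = esLoop (esDelta.getD (0, if carASimb c ≠ "Comillas" then "Otro" else carASimb c) 0) rest
      from by rw [esLoop]; rfl]
    rw [simb_norm]
    by_cases hc : c = '"'
    · subst hc
      rw [if_pos rfl, show esDelta.getD ((0 : Int), "Comillas") 0 = 1 from rfl]
      rw [slice_one_negone, isIn_singleton]
      have hopen := esLoop_open rest 1 (Or.inl rfl)
      rcases rest with _ | ⟨d, r⟩
      · simp [esLoop] at hopen ⊢
      · have hget : PySem.List.pyGet? ('"' :: d :: r) (-1)
            = (d :: r).getLast? := by
          simp [PySem.List.pyGet?, PySem.List.pyIdx?, List.getLast?_eq_getElem?]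
          rfl
        rw [Bool.eq_iff_iff]
        simp only [Bool.and_eq_true, decide_eq_true_eq, beq_iff_eq, Bool.not_eq_true',
          hget, hopen]
        constructor
        · rintro ⟨_, hlast, hmem⟩
          refine ⟨⟨⟨by simp, by simp [PySem.List.pyGet?, PySem.List.pyIdx?]; rw [if_pos (by omega)]; rfl⟩, hlast⟩, by simpa [List.contains_eq_mem] using hmem⟩
        · rintro ⟨⟨⟨_, _⟩, hlast⟩, hnotin⟩
          exact ⟨by simp, hlast, by simpa [List.contains_eq_mem] using hnotin⟩
    · rw [if_neg hc, show esDelta.getD ((0 : Int), "Otro") 0 = 2 from rfl, esLoop_two]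
      simp [PySem.List.pyGet?, PySem.List.pyIdx?, hc]
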